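-- pv_equiv track=rewrite | github.com/ASSERT-KTH/Mokav | experiments/pynguin/c4b/return-lst/generated_tests/src_2326/3/src_2326.py | func
-- ===== SOURCE A (Python) =====
-- def func(*args):
-- 	ret_values = []
--
-- 	word = args[0]
-- 	count = 0
-- 	output = ''
-- 	for x in word:
-- 	    if ((count == 0) and x.islower()):
-- 	        x = x.upper()
-- 	    elif x.isupper():
-- 	        x = x.lower()
-- 	    else:
-- 	        ret_values.append(word)
-- 	        break
-- 	    count += 1
-- 	    output += x
-- 	if (count == len(word)):
-- 	    ret_values.append(output)
--
-- 	return ret_values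
-- ===== SOURCE B (Python) =====
-- def func(*args):
--     word = args[0]
--     valid = (word == '' or word[0].islower() or word[0].isupper()) \
--         and all(c.isupper() for c in word[1:])
--     if valid:
--         return [word[:1].swapcase() + word[1:].lower()]
--     return [word]
-- ===== Notes on version B (the rewrite author's own statement) =====
-- stated objective: simpler
-- what changed: B replaces A's char-by-char loop with break, count and running output accumulator by a single closed-form validity predicate (first char is a letter or word empty, rest all uppercase) plus a sliced-string construction word[:1].swapcase() + word[1:].lower().
import Mathlib
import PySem

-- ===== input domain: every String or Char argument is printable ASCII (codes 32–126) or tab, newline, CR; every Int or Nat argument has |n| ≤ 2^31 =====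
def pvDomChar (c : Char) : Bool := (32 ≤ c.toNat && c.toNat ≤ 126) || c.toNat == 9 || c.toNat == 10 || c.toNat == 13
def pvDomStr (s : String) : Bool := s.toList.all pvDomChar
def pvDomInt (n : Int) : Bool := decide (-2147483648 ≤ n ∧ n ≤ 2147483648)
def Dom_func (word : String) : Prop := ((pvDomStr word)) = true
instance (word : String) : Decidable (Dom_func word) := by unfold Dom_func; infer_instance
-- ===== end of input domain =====

-- One honest line: B replaces A's incremental loop-with-break by a validity predicate
-- plus a closed-form slice construction (objective: simpler).

-- ===== PORT A =====
-- per-char case helpers, exact on the ASCII domain (Python's islower/isupper/upper/lower on one char)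
def chIsLower (c : Char) : Bool := 'a' ≤ c && c ≤ 'z'
def chIsUpper (c : Char) : Bool := 'A' ≤ c && c ≤ 'Z'
def chUpper (c : Char) : Char := if chIsLower c then Char.ofNat (c.toNat - 32) else c
def chLower (c : Char) : Char := if chIsUpper c then Char.ofNat (c.toNat + 32) else c

-- the for-loop: returns (ret_values, count, output); 'break' appends word and stops
def funcLoop (word : String) : List Char → Int → List Char → List String →
    (List String × Int × List Char)
  | [], count, output, ret => (ret, count, output)
  | x :: rest, count, output, ret =>
      if count = 0 ∧ chIsLower x then
        funcLoop word rest (count + 1) (output ++ [chUpper x]) ret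
      else if chIsUpper x then
        funcLoop word rest (count + 1) (output ++ [chLower x]) ret
      else (ret ++ [word], count, output)

def func (word : String) : List String :=
  let r := funcLoop word word.toList 0 [] []
  if r.2.1 = (PySem.Str.len word : Int) then r.1 ++ [String.ofList r.2.2] else r.1

-- ===== PORT B =====
def func_alt (word : String) : List String :=
  let cs := word.toList
  let valid := (cs = [] || chIsLower (cs.headD ' ') || chIsUpper (cs.headD ' '))
      && (cs.drop 1).all chIsUpper
  if valid then
    [String.ofList ((cs.take 1).map (fun c => if chIsLower c then chUpper c else chLower c)
        ++ (cs.drop 1).map chLower)]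
  else [word]

-- ===== PRECONDITION & SPEC =====
def Spec_func (word : String) (out : List String) : Prop := out = func_alt word
instance (word : String) (out : List String) : Decidable (Spec_func word out) := by unfold Spec_func; infer_instance

-- ===== CLAIM (what is proved, stated in full; the proofs are below) =====
def Claim_equal_func : Prop := ∀ (word : String), Dom_func word → Spec_func word (func word)

-- ===== LEMMAS AND PROOFS =====

-- once count ≥ 1 the loop lowers uppercase chars until a non-uppercase char breaks it
theorem funcLoop_tail (word : String) (cs : List Char) :
    ∀ (c : Int) (out : List Char) (ret : List String), 1 ≤ c →
    (cs.all chIsUpper = true →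
      funcLoop word cs c out ret = (ret, c + cs.length, out ++ cs.map chLower)) ∧
    (cs.all chIsUpper = false →
      ∃ c' out', funcLoop word cs c out ret = (ret ++ [word], c', out') ∧ c' < c + cs.length) := by
  induction cs with
  | nil =>
      intro c out ret hc
      refine ⟨fun _ => by simp [funcLoop], fun h => by simp at h⟩
  | cons x rest ih =>
      intro c out ret hc
      constructor
      · intro hall
        simp only [List.all_cons, Bool.and_eq_true] at hall
        have h1 : ¬ (c = 0 ∧ chIsLower x = true) := by
          rintro ⟨h, -⟩; omega
        have := (ih (c+1) (out ++ [chLower x]) ret (by omega)).1 hall.2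
        simp only [funcLoop, if_neg h1, hall.1, if_pos]
        rw [this]
        simp [List.length_cons]
        omega
      · intro hall
        simp only [List.all_cons, Bool.and_eq_false_iff] at hall
        have h1 : ¬ (c = 0 ∧ chIsLower x = true) := by
          rintro ⟨h, -⟩; omega
        by_cases hx : chIsUpper x = true
        · have hrest : rest.all chIsUpper = false := by
            rcases hall with h | h
            · rw [hx] at h; exact absurd h (by simp)
            · exact h
          obtain ⟨c', out', heq, hlt⟩ :=
            (ih (c+1) (out ++ [chLower x]) ret (by omega)).2 hrest
          refine ⟨c', out', ?_, ?_⟩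
          · simp only [funcLoop, if_neg h1, hx, if_pos]; exact heq
          · simp only [List.length_cons]; push_cast; omega
        · refine ⟨c, out, ?_, ?_⟩
          · simp only [funcLoop, if_neg h1]
            simp [hx]
          · simp [List.length_cons]

theorem func_spec : Claim_equal_func := by
  intro word _
  unfold Spec_func func func_alt
  have hlen : (PySem.Str.len word : Int) = (word.toList.length : Int) := by
    simp [PySem.Str.len]
  rcases hcs : word.toList with _ | ⟨x, rest⟩
  · simp [funcLoop, hcs]
  · simp only [hcs, hlen]
    by_cases hlo : chIsLower x = true
    · have hup : chIsUpper x = false := by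
        simp [chIsLower] at hlo
        simp [chIsUpper]
        intro _
        exact lt_of_lt_of_le (by decide) hlo.1
      have step : funcLoop word (x :: rest) 0 [] [] =
          funcLoop word rest 1 [chUpper x] [] := by
        simp [funcLoop, hlo]
      by_cases hall : rest.all chIsUpper = true
      · have := (funcLoop_tail word rest 1 [chUpper x] [] (le_refl 1)).1 hall
        rw [step, this]
        simp [hall, hlo, chLower, hup]
        omega
      · obtain ⟨c', out', heq, hlt⟩ :=
          (funcLoop_tail word rest 1 [chUpper x] [] (le_refl 1)).2 (by simpa using hall)
        rw [step, heq,
          if_neg (show ¬ (c' = ((x :: rest).length : Int)) by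
            simp only [List.length_cons]; push_cast; omega)]
        simp [hall]
    · by_cases hup : chIsUpper x = true
      · have step : funcLoop word (x :: rest) 0 [] [] =
            funcLoop word rest 1 [chLower x] [] := by
          simp [funcLoop, hlo, hup]
        by_cases hall : rest.all chIsUpper = true
        · have := (funcLoop_tail word rest 1 [chLower x] [] (le_refl 1)).1 hall
          rw [step, this]
          simp [hall, hlo, hup, chUpper]
          omega
        · obtain ⟨c', out', heq, hlt⟩ :=
            (funcLoop_tail word rest 1 [chLower x] [] (le_refl 1)).2 (by simpa using hall)
          rw [step, heq,
            if_neg (show ¬ (c' = ((x :: rest).length : Int)) by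
              simp only [List.length_cons]; push_cast; omega)]
          simp [hall, hup]
      · have step : funcLoop word (x :: rest) 0 [] [] = ([word], 0, []) := by
          simp [funcLoop, hlo, hup]
        rw [step,
          if_neg (show ¬ ((0:Int) = ((x :: rest).length : Int)) by
            simp only [List.length_cons]; push_cast; omega)]
        simp [hlo, hup]
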